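-- pv_equiv track=rewrite | github.com/Henrique-de-la-Pena/projetoEP2 | funcoes.py | calcula_pontos_quadra
-- ===== SOURCE A (Python) =====
-- def calcula_pontos_quadra(dados_rolados):
--     dados = {}
--     soma = 0
--     for i in range(len(dados_rolados)):
--         if dados_rolados[i] not in dados:
--             dados[dados_rolados[i]] = 1
--         else:
--             dados[dados_rolados[i]] += 1
--     for qtd in dados.values():
--         if qtd >= 4 and soma == 0:
--             for valor, vezes in dados.items():
--                 soma += valor * vezes
--     return soma
-- ===== SOURCE B (Python) =====
-- def calcula_pontos_quadra(dados_rolados):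
--     ordenados = sorted(dados_rolados)
--     tem_quadra = False
--     sequencia = 0
--     anterior = None
--     for valor in ordenados:
--         if anterior is not None and valor == anterior:
--             sequencia += 1
--         else:
--             anterior = valor
--             sequencia = 1
--         if sequencia >= 4:
--             tem_quadra = True
--     return sum(dados_rolados) if tem_quadra else 0
-- ===== Notes on version B (the rewrite author's own statement) =====
-- stated objective: alternative
-- what changed: Replaces A's frequency dict plus a values pass that re-sums the dict items by a sort of a copy and a single scan counting runs of equal consecutive values, returning sum(dados_rolados) iff some run reaches length 4.
import Mathlib
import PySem

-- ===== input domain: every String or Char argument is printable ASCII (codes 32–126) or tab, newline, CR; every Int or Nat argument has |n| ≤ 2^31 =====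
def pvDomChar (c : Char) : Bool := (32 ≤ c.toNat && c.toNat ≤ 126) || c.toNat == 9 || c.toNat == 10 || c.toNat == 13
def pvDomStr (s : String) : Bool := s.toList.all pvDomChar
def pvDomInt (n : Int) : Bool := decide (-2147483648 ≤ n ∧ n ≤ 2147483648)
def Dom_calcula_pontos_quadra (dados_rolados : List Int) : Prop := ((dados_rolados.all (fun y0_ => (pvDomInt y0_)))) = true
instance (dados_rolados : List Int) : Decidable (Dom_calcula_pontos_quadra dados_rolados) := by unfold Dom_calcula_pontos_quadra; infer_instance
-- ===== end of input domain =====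

-- B replaces A's frequency dict and dict-resumming pass by sorting a copy and scanning once
-- for a run of 4 equal consecutive values (alternative decomposition, similar cost).


-- ===== PORT A =====
-- for i in range(len(dados_rolados)): count dados_rolados[i] into the dict 'dados';
-- then for qtd in dados.values(): if qtd >= 4 and soma == 0: soma += sum(valor*vezes over items)
def calcula_pontos_quadra (dados_rolados : List Int) : Int :=
  let dados : PySem.Dict Int Int :=
    (PySem.List.pyRange 0 (PySem.List.len dados_rolados)).foldl
      (fun dados i =>
        if dados.contains (PySem.List.pyGetD dados_rolados i 0) = false then
          dados.insert (PySem.List.pyGetD dados_rolados i 0) 1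
        else
          dados.insert (PySem.List.pyGetD dados_rolados i 0)
            (dados.getD (PySem.List.pyGetD dados_rolados i 0) 0 + 1))
      PySem.Dict.empty
  let soma : Int :=
    dados.values.foldl
      (fun soma qtd =>
        if 4 ≤ qtd ∧ soma = 0 then
          dados.items.foldl (fun soma p => soma + p.1 * p.2) soma
        else soma)
      0
  soma

-- ===== PORT B =====
-- sort a copy, scan once tracking the run of equal consecutive values;
-- state = (tem_quadra, sequencia, anterior)
def calcula_pontos_quadra_alt (dados_rolados : List Int) : Int :=
  let ordenados := PySem.List.sorted dados_rolados (fun x => x)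
  let st :=
    ordenados.foldl
      (fun (st : Bool × Int × Option Int) valor =>
        let s2 : Int × Option Int :=
          if st.2.2 ≠ none ∧ some valor = st.2.2 then (st.2.1 + 1, st.2.2)
          else (1, some valor)
        (if 4 ≤ s2.1 then true else st.1, s2))
      (false, 0, none)
  if st.1 then dados_rolados.sum else 0

-- ===== PRECONDITION & SPEC =====
def Spec_calcula_pontos_quadra (dados_rolados : List Int) (out : Int) : Prop := out = calcula_pontos_quadra_alt dados_rolados
instance (dados_rolados : List Int) (out : Int) : Decidable (Spec_calcula_pontos_quadra dados_rolados out) := by unfold Spec_calcula_pontos_quadra; infer_instance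

-- ===== CLAIM (what is proved, stated in full; the proofs are below) =====
def Claim_equal_calcula_pontos_quadra : Prop := ∀ (dados_rolados : List Int), Dom_calcula_pontos_quadra dados_rolados → Spec_calcula_pontos_quadra dados_rolados (calcula_pontos_quadra dados_rolados)

-- ===== LEMMAS AND PROOFS =====

-- the body of B's scan, named for the proofs
def pvStepB (st : Bool × Int × Option Int) (valor : Int) : Bool × Int × Option Int :=
  let s2 : Int × Option Int :=
    if st.2.2 ≠ none ∧ some valor = st.2.2 then (st.2.1 + 1, st.2.2)
    else (1, some valor)
  (if 4 ≤ s2.1 then true else st.1, s2)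

theorem pv_count_ne (t : List Int) (v w : Int) (h : w ≠ v) :
    (v :: t).count w = t.count w := by
  rw [List.count_cons]; simp [Ne.symm h]

theorem pv_alt_eq (l : List Int) :
    calcula_pontos_quadra_alt l =
      if (List.foldl pvStepB (false, 0, none) (PySem.List.sorted l (fun x => x))).1
      then l.sum else 0 := rfl

-- A's counting loop builds Counter(dados_rolados)
theorem pv_dict_eq (l : List Int) :
    (PySem.List.pyRange 0 (PySem.List.len l)).foldl
      (fun (dados : PySem.Dict Int Int) i =>
        if dados.contains (PySem.List.pyGetD l i 0) = false then
          dados.insert (PySem.List.pyGetD l i 0) 1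
        else
          dados.insert (PySem.List.pyGetD l i 0)
            (dados.getD (PySem.List.pyGetD l i 0) 0 + 1))
      PySem.Dict.empty = PySem.Dict.counter l := by
  rw [PySem.List.foldl_pyRange_pyGetD l 0
    (fun (dados : PySem.Dict Int Int) x =>
      if dados.contains x = false then dados.insert x 1
      else dados.insert x (dados.getD x 0 + 1))
    PySem.Dict.empty (le_refl 0)]
  rw [Int.toNat_zero, List.drop_zero]
  have hf : (fun (dados : PySem.Dict Int Int) x =>
      if dados.contains x = false then dados.insert x 1
      else dados.insert x (dados.getD x 0 + 1))
      = fun (dados : PySem.Dict Int Int) x => dados.insert x (dados.getD x 0 + 1) := by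
    funext d x
    by_cases h : d.contains x = false
    · rw [if_pos h, PySem.Dict.getD_of_not_contains d 0 h]
      norm_num
    · rw [if_neg h]
  rw [hf, PySem.Dict.foldl_insert_getD_add_one_eq_counter]

-- A's outer values loop, after the inner items loop is summed out
theorem pv_soma_loop (qs : List Int) (S : Int) : ∀ soma : Int,
    qs.foldl (fun soma qtd => if 4 ≤ qtd ∧ soma = 0 then soma + S else soma) soma
      = if soma = 0 ∧ qs.any (fun q => decide (4 ≤ q)) then S else soma := by
  induction qs with
  | nil => intro soma; simp
  | cons q t ih =>
    intro soma
    simp only [List.foldl_cons, List.any_cons]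
    by_cases hs : soma = 0
    · by_cases hq : 4 ≤ q
      · rw [if_pos ⟨hq, hs⟩, ih]
        subst hs
        rw [if_pos (show (0:Int) = 0 ∧ (decide (4 ≤ q) || t.any fun q => decide (4 ≤ q)) = true
          from ⟨rfl, by simp [hq]⟩)]
        split_ifs <;> omega
      · rw [if_neg (by tauto), ih]
        simp [hs, hq]
    · rw [if_neg (by tauto), ih]
      simp [hs]

-- sum over a nodup key list of the single term at x
theorem pv_sum_ite (x : Int) : ∀ (K : List Int), K.Nodup → x ∈ K →
    (K.map (fun k => if k = x then k else 0)).sum = x := by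
  intro K
  induction K with
  | nil => intro _ h; simp at h
  | cons k K ih =>
    intro hnd hmem
    rw [List.nodup_cons] at hnd
    by_cases hxk : k = x
    · subst hxk
      simp only [List.map_cons, List.sum_cons]
      have hz : (K.map (fun j => if j = k then j else 0)).sum = 0 := by
        apply List.sum_eq_zero
        intro y hy
        simp only [List.mem_map] at hy
        obtain ⟨j, hj, rfl⟩ := hy
        have : j ≠ k := fun h => hnd.1 (h ▸ hj)
        simp [this]
      simp [hz]
    · have hx : x ∈ K := by
        rcases List.mem_cons.mp hmem with h | h
        · exact absurd h.symm hxk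
        · exact h
      simp only [List.map_cons, List.sum_cons, if_neg hxk, ih hnd.2 hx]
      ring

theorem pv_sum_count (xs : List Int) : ∀ (K : List Int), K.Nodup → (∀ v ∈ xs, v ∈ K) →
    (K.map (fun k => k * (xs.count k : Int))).sum = xs.sum := by
  induction xs with
  | nil => intro K _ _; simp
  | cons x t ih =>
    intro K hnd hcov
    have hmap : (K.map (fun k => k * (((x :: t).count k : Nat) : Int)))
        = K.map (fun k => k * (t.count k : Int) + (if k = x then k else 0)) := by
      apply List.map_congr_left
      intro k _
      rw [List.count_cons]
      by_cases hk : k = x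
      · subst hk
        simp only [BEq.rfl, if_true]
        push_cast; ring
      · have hxk : ¬ x = k := fun h => hk h.symm
        simp only [beq_iff_eq, if_neg hk, if_neg hxk]
        push_cast; ring
    rw [hmap, PySem.List.sum_map_add_int, ih K hnd (fun v hv => hcov v (List.mem_cons_of_mem _ hv)),
      pv_sum_ite x K hnd (hcov x (List.mem_cons_self))]
    simp [List.sum_cons]; ring

-- B's scan over a sorted tail: invariant of the run counter
theorem pv_runB : ∀ (l : List Int) (a run : Int) (tem : Bool),
    l.Pairwise (· ≤ ·) → (∀ x ∈ l, a ≤ x) → (4 ≤ run → tem = true) →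
    (l.foldl pvStepB (tem, run, some a)).1
      = (tem || decide (4 ≤ run + (l.count a : Int))
             || decide (∃ v ∈ l, v ≠ a ∧ 4 ≤ (l.count v : Int))) := by
  intro l
  induction l with
  | nil =>
    intro a run tem _ _ htem
    by_cases h4 : 4 ≤ run
    · simp [htem h4]
    · simp [h4]
  | cons v t ih =>
    intro a run tem hpw ha htem
    have hav : a ≤ v := ha v List.mem_cons_self
    have hpt : t.Pairwise (· ≤ ·) := (List.pairwise_cons.mp hpw).2
    have hvt : ∀ x ∈ t, v ≤ x := fun x hx => (List.pairwise_cons.mp hpw).1 x hx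
    by_cases hva : v = a
    · subst hva
      have hstep : pvStepB (tem, run, some v) v
          = ((if 4 ≤ run + 1 then true else tem), run + 1, some v) := by
        simp [pvStepB]
      rw [List.foldl_cons, hstep,
        ih v (run + 1) _ hpt hvt (fun h => by rw [if_pos h])]
      have hift : (if 4 ≤ run + 1 then true else tem) = (decide (4 ≤ run + 1) || tem) := by
        split_ifs with h <;> simp [h]
      rw [hift, Bool.eq_iff_iff]
      have hcv : (((v :: t).count v : Nat) : Int) = (t.count v : Int) + 1 := by
        rw [List.count_cons]; simp
      simp only [Bool.or_eq_true, decide_eq_true_eq]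
      constructor
      · rintro ((h | h) | ⟨w, hw, hwv, hwc⟩)
        · rcases h with h | h
          · refine Or.inl (Or.inr ?_)
            rw [hcv]; omega
          · exact Or.inl (Or.inl h)
        · refine Or.inl (Or.inr ?_)
          rw [hcv]; omega
        · refine Or.inr ⟨w, List.mem_cons_of_mem _ hw, hwv, ?_⟩
          rw [pv_count_ne t v w hwv]; exact hwc
      · rintro ((h | h) | ⟨w, hw, hwv, hwc⟩)
        · exact Or.inl (Or.inl (Or.inr h))
        · refine Or.inl (Or.inr ?_)
          rw [hcv] at h; omega
        · rcases List.mem_cons.mp hw with h | h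
          · exact absurd h hwv
          · refine Or.inr ⟨w, h, hwv, ?_⟩
            rw [← pv_count_ne t v w hwv]; exact hwc
    · have hstep : pvStepB (tem, run, some a) v = (tem, 1, some v) := by
        simp [pvStepB, hva]
      have hnat : ∀ x ∈ t, ¬ x = a :=
        fun x hx h => hva (le_antisymm (h ▸ hvt x hx) hav)
      have hca : (v :: t).count a = 0 := by
        rw [List.count_eq_zero]
        intro hmem
        rcases List.mem_cons.mp hmem with h | h
        · exact hva h.symm
        · exact hnat a h rfl
      rw [List.foldl_cons, hstep,
        ih v 1 tem hpt hvt (fun h => absurd h (by norm_num))]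
      by_cases h4 : 4 ≤ run
      · simp [htem h4]
      · rw [Bool.eq_iff_iff]
        simp only [Bool.or_eq_true, decide_eq_true_eq]
        constructor
        · rintro ((h | h) | ⟨w, hw, hwv, hwc⟩)
          · exact Or.inl (Or.inl h)
          · refine Or.inr ⟨v, List.mem_cons_self, fun h' => hva h', ?_⟩
            have : (v :: t).count v = t.count v + 1 := by rw [List.count_cons]; simp
            rw [this]; push_cast; omega
          · refine Or.inr ⟨w, List.mem_cons_of_mem _ hw, hnat w hw, ?_⟩
            rw [pv_count_ne t v w hwv]; exact hwc
        · rintro ((h | h) | ⟨w, hw, hwa, hwc⟩)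
          · exact Or.inl (Or.inl h)
          · rw [hca] at h; omega
          · rcases List.mem_cons.mp hw with h | h
            · subst h
              refine Or.inl (Or.inr ?_)
              have : (w :: t).count w = t.count w + 1 := by rw [List.count_cons]; simp
              rw [this] at hwc; push_cast at hwc ⊢; omega
            · by_cases hwv : w = v
              · subst hwv
                refine Or.inl (Or.inr ?_)
                have : (w :: t).count w = t.count w + 1 := by rw [List.count_cons]; simp
                rw [this] at hwc; push_cast at hwc ⊢; omega
              · refine Or.inr ⟨w, h, hwv, ?_⟩
                rw [← pv_count_ne t v w hwv]; exact hwc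

theorem pv_altB (l : List Int) (hl : l.Pairwise (· ≤ ·)) :
    (l.foldl pvStepB (false, 0, none)).1 = decide (∃ v ∈ l, 4 ≤ (l.count v : Int)) := by
  cases l with
  | nil => simp
  | cons x t =>
    have hstep : pvStepB (false, 0, none) x = (false, 1, some x) := by
      norm_num [pvStepB]
    rw [List.foldl_cons, hstep,
      pv_runB t x 1 false (List.pairwise_cons.mp hl).2 (List.pairwise_cons.mp hl).1
        (fun h => absurd h (by norm_num))]
    rw [Bool.eq_iff_iff]
    simp only [Bool.or_eq_true, Bool.false_or, decide_eq_true_eq]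
    have hcx : (x :: t).count x = t.count x + 1 := by rw [List.count_cons]; simp
    constructor
    · rintro (h | ⟨w, hw, hwx, hwc⟩)
      · refine ⟨x, List.mem_cons_self, ?_⟩
        rw [hcx]; push_cast at h ⊢; omega
      · refine ⟨w, List.mem_cons_of_mem _ hw, ?_⟩
        rw [pv_count_ne t x w hwx]; exact hwc
    · rintro ⟨v, hv, hvc⟩
      rcases List.mem_cons.mp hv with h | h
      · subst h
        refine Or.inl ?_
        rw [hcx] at hvc; push_cast at hvc ⊢; omega
      · by_cases hvx : v = x
        · subst hvx
          refine Or.inl ?_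
          rw [hcx] at hvc; push_cast at hvc ⊢; omega
        · refine Or.inr ⟨v, h, hvx, ?_⟩
          rw [← pv_count_ne t x v hvx]; exact hvc

-- ===== VERDICT (by name: the statement is the Claim_ definition above) =====
theorem calcula_pontos_quadra_spec : Claim_equal_calcula_pontos_quadra := by
  intro l _
  unfold Spec_calcula_pontos_quadra
  rw [pv_alt_eq]
  have hA : calcula_pontos_quadra l =
      (PySem.Dict.counter l).values.foldl
        (fun soma qtd =>
          if 4 ≤ qtd ∧ soma = 0 then
            (PySem.Dict.counter l).items.foldl (fun soma p => soma + p.1 * p.2) soma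
          else soma) 0 := by
    unfold calcula_pontos_quadra
    rw [pv_dict_eq]
  have hinner : (fun (soma qtd : Int) =>
      if 4 ≤ qtd ∧ soma = 0 then
        (PySem.Dict.counter l).items.foldl (fun soma p => soma + p.1 * p.2) soma
      else soma)
      = fun (soma qtd : Int) =>
        if 4 ≤ qtd ∧ soma = 0 then
          soma + ((PySem.Dict.counter l).items.map (fun p => p.1 * p.2)).sum
        else soma := by
    funext soma qtd
    rw [PySem.List.foldl_add]
  have hS : ((PySem.Dict.counter l).items.map (fun p => p.1 * p.2)).sum = l.sum := by
    rw [PySem.Dict.items_counter, List.map_map]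
    have hc : ((fun (p : Int × Int) => p.1 * p.2) ∘ fun k => (k, (List.count k l : Int)))
        = fun k => k * (l.count k : Int) := rfl
    rw [hc]
    exact pv_sum_count l (PySem.Set.ofList l) (PySem.Set.nodup_ofList l)
      (fun v hv => (PySem.Set.mem_ofList l v).mpr hv)
  rw [hA, hinner, pv_soma_loop, hS]
  rw [pv_altB (PySem.List.sorted l (fun x => x)) (PySem.List.sorted_pairwise l (fun x => x))]
  have hperm := PySem.List.sorted_perm l (fun x => x) false
  have hcond : ((PySem.Dict.counter l).values.any fun q => decide (4 ≤ q))
      = decide (∃ v ∈ PySem.List.sorted l (fun x => x),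
          4 ≤ (((PySem.List.sorted l (fun x => x)).count v : Nat) : Int)) := by
    have hv : (PySem.Dict.counter l).values
        = (PySem.Set.ofList l).map (fun k => (List.count k l : Int)) := by
      show ((PySem.Dict.counter l).items.map Prod.snd) = _
      rw [PySem.Dict.items_counter, List.map_map]
      rfl
    rw [hv, List.any_map, Bool.eq_iff_iff]
    simp only [List.any_eq_true, Function.comp, decide_eq_true_eq]
    constructor
    · rintro ⟨k, hk, h4⟩
      refine ⟨k, hperm.mem_iff.mpr ((PySem.Set.mem_ofList l k).mp hk), ?_⟩
      rw [hperm.count_eq]; exact h4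
    · rintro ⟨v, hv', h4⟩
      refine ⟨v, (PySem.Set.mem_ofList l v).mpr (hperm.mem_iff.mp hv'), ?_⟩
      rw [← hperm.count_eq]; exact h4
  rw [hcond]
  simp
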